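-- pv_equiv track=rewrite | github.com/jramaswami/Binary_Search_Python | a_number_and_its_triple.py | solve
-- ===== SOURCE A (Python) =====
-- import collections
--
-- def solve(nums):
--     freqs = collections.Counter(nums)
--     for n in nums:
--         if n == 0:
--             if freqs[0] > 1:
--                 return True
--         elif freqs[n*3] > 0:
--             return True
--     return False
-- ===== SOURCE B (Python) =====
-- def solve(nums):
--     # sorted copy + hand-written binary search (bisect may not be imported here);
--     # bisect_left is the exact stdlib algorithm
--     s = sorted(nums)
--
--     def bisect_left(a, x):
--         lo, hi = 0, len(a)
--         while lo < hi:
--             mid = (lo + hi) // 2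
--             if a[mid] < x:
--                 lo = mid + 1
--             else:
--                 hi = mid
--         return lo
--
--     for n in nums:
--         if n == 0:
--             i = bisect_left(s, 0)
--             if i + 1 < len(s) and s[i + 1] == 0:
--                 return True
--         else:
--             j = bisect_left(s, 3 * n)
--             if j < len(s) and s[j] == 3 * n:
--                 return True
--     return False
-- ===== Notes on version B (the rewrite author's own statement) =====
-- stated objective: alternative
-- what changed: Replaces A's Counter hash table with a sorted copy of the input queried by hand-written binary search (bisect_left), checking 3*n directly and the zero case via the slot after bisect_left(s,0).
import Mathlib
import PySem

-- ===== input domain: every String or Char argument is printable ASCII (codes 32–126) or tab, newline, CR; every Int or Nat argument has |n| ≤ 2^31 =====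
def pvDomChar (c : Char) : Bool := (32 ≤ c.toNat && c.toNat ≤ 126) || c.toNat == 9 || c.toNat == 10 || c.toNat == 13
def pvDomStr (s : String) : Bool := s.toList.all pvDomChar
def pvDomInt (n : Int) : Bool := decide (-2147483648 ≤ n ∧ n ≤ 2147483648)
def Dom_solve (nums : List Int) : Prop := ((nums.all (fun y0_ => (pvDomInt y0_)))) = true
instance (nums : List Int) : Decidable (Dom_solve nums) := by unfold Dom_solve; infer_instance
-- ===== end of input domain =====

-- B replaces A's Counter hash table by a sorted copy of the input queried with binary
-- search (bisect_left) — an alternative data-structure decomposition, not claimed faster.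

-- ===== PORT A =====
-- the 'for n in nums: … return True / return False' loop, with the Counter built once
def loopA (freqs : PySem.Dict Int Int) : List Int → Bool
  | [] => false
  | n :: rest =>
    if n = 0 then
      if freqs.getD 0 0 > 1 then true else loopA freqs rest
    else
      if freqs.getD (n * 3) 0 > 0 then true else loopA freqs rest

def solve (nums : List Int) : Bool :=
  loopA (PySem.Dict.counter nums) nums

-- ===== PORT B =====
-- Source B's hand-written bisect_left is byte-for-byte the stdlib bisect.bisect_left
-- algorithm (bisect may not be imported there), so it is ported as PySem.List.bisectLeft.
def loopB (s : List Int) : List Int → Bool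
  | [] => false
  | n :: rest =>
    if n = 0 then
      if PySem.List.bisectLeft s (0 : Int) + 1 < s.length ∧
          s.getD (PySem.List.bisectLeft s (0 : Int) + 1) 0 = 0 then true
      else loopB s rest
    else
      if PySem.List.bisectLeft s (3 * n) < s.length ∧
          s.getD (PySem.List.bisectLeft s (3 * n)) 0 = 3 * n then true
      else loopB s rest

def solve_alt (nums : List Int) : Bool :=
  loopB (PySem.List.sorted nums (fun x => x) false) nums

-- ===== PRECONDITION & SPEC =====
def Spec_solve (nums : List Int) (out : Bool) : Prop := out = solve_alt nums
instance (nums : List Int) (out : Bool) : Decidable (Spec_solve nums out) := by unfold Spec_solve; infer_instance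

-- ===== CLAIM (what is proved, stated in full; the proofs are below) =====
def Claim_equal_solve : Prop := ∀ (nums : List Int), Dom_solve nums → Spec_solve nums (solve nums)

-- ===== LEMMAS AND PROOFS =====

-- monotonicity of a sorted list at two indices
theorem sorted_getD_mono (s : List Int) (hs : List.Pairwise (· ≤ ·) s)
    {j k : Nat} (hk : k < s.length) (hjk : j ≤ k) :
    s[j]'(lt_of_le_of_lt hjk hk) ≤ s[k] := by
  rcases Nat.eq_or_lt_of_le hjk with h | h
  · exact le_of_eq (by congr)
  · exact List.pairwise_iff_getElem.mp hs j k (lt_of_le_of_lt hjk hk) hk h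

-- membership in a sorted list ↔ bisect_left finds it
theorem bisect_mem_iff (s : List Int) (hs : List.Pairwise (· ≤ ·) s) (x : Int) :
    x ∈ s ↔ (PySem.List.bisectLeft s x < s.length ∧ s.getD (PySem.List.bisectLeft s x) 0 = x) := by
  obtain ⟨hle, hlt, hge⟩ := PySem.List.bisectLeft_spec s x hs
  set i := PySem.List.bisectLeft s x with hi
  constructor
  · intro hx
    obtain ⟨j, hj, hjx⟩ := List.mem_iff_getElem.mp hx
    have hij : i ≤ j := by
      by_contra h
      exact absurd hjx (ne_of_lt (hlt j hj (Nat.lt_of_not_le h)))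
    have hilen : i < s.length := lt_of_le_of_lt hij hj
    refine ⟨hilen, ?_⟩
    rw [List.getD_eq_getElem s 0 hilen]
    exact le_antisymm (le_of_le_of_eq (sorted_getD_mono s hs hj hij) hjx) (hge i hilen le_rfl)
  · rintro ⟨h1, h2⟩
    rw [List.getD_eq_getElem s 0 h1] at h2
    exact h2 ▸ List.getElem_mem h1

-- at least two copies of x in a sorted list ↔ the slot after bisect_left is x too
theorem bisect_two_le_count_iff (s : List Int) (hs : List.Pairwise (· ≤ ·) s) (x : Int) :
    2 ≤ s.count x ↔
      (PySem.List.bisectLeft s x + 1 < s.length ∧ s.getD (PySem.List.bisectLeft s x + 1) 0 = x) := by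
  obtain ⟨hle, hlt, hge⟩ := PySem.List.bisectLeft_spec s x hs
  set i := PySem.List.bisectLeft s x with hi
  constructor
  · intro h2
    have hx : x ∈ s := List.count_pos_iff.mp (by omega)
    obtain ⟨hilen, hsi⟩ := (bisect_mem_iff s hs x).mp hx
    rw [List.getD_eq_getElem s 0 hilen] at hsi
    -- count in the prefix take (i+1) is exactly 1
    have htake0 : List.count x (List.take i s) = 0 := by
      rw [List.count_eq_zero]
      intro hmem
      obtain ⟨j, hj, hjx⟩ := List.mem_iff_getElem.mp hmem
      have hj' : j < i := lt_of_lt_of_le hj (by simp [List.length_take])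
      rw [List.getElem_take] at hjx
      exact absurd hjx (ne_of_lt (hlt j (by omega) hj'))
    have hsplit : List.count x s
        = List.count x (List.take (i + 1) s) + List.count x (List.drop (i + 1) s) := by
      rw [← List.count_append, List.take_append_drop]
    have htake1 : List.count x (List.take (i + 1) s) = 1 := by
      rw [List.take_add_one, List.count_append, htake0, List.getElem?_eq_getElem hilen]
      simp [hsi]
    have hdrop : 1 ≤ List.count x (List.drop (i + 1) s) := by omega
    have hxd : x ∈ List.drop (i + 1) s := List.count_pos_iff.mp (by omega)
    obtain ⟨j, hj, hjx⟩ := List.mem_iff_getElem.mp hxd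
    rw [List.getElem_drop] at hjx
    have hlen' : i + 1 + j < s.length := by
      have := hj; simp [List.length_drop] at this; omega
    have hi1 : i + 1 < s.length := by omega
    refine ⟨hi1, ?_⟩
    rw [List.getD_eq_getElem s 0 hi1]
    exact le_antisymm (le_of_le_of_eq (sorted_getD_mono s hs hlen' (by omega)) hjx)
      (hge (i + 1) hi1 (by omega))
  · rintro ⟨h1, h2⟩
    rw [List.getD_eq_getElem s 0 h1] at h2
    have hilen : i < s.length := by omega
    have hsi : s[i] = x :=
      le_antisymm (le_of_le_of_eq (sorted_getD_mono s hs h1 (by omega)) h2) (hge i hilen le_rfl)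
    have hsub : List.count x (List.drop i s) ≤ List.count x s :=
      (List.drop_sublist i s).count_le x
    rw [List.drop_eq_getElem_cons hilen, List.drop_eq_getElem_cons h1] at hsub
    simp [hsi, h2] at hsub
    omega

-- the two loops agree for any base list nums
theorem loop_eq (nums : List Int) (l : List Int) :
    loopA (PySem.Dict.counter nums) l = loopB (PySem.List.sorted nums (fun x => x) false) l := by
  have hperm := PySem.List.sorted_perm nums (fun x => x) false
  have hs := PySem.List.sorted_pairwise nums (fun x => x)
  set s := PySem.List.sorted nums (fun x => x) false with hsdef
  induction l with
  | nil => rfl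
  | cons n rest ih =>
    simp only [loopA, loopB, ih]
    by_cases hn : n = 0
    · subst hn
      rw [if_pos rfl, if_pos rfl]
      refine if_congr ?_ rfl rfl
      rw [PySem.Dict.getD_counter, ← bisect_two_le_count_iff s hs 0, hperm.count_eq 0]
      constructor <;> intro h <;> [exact_mod_cast h; exact_mod_cast h]
    · rw [if_neg hn, if_neg hn]
      refine if_congr ?_ rfl rfl
      rw [PySem.Dict.getD_counter, ← bisect_mem_iff s hs (3 * n), hperm.mem_iff,
        mul_comm 3 n]
      constructor
      · intro h; exact List.count_pos_iff.mp (by exact_mod_cast h)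
      · intro h; exact_mod_cast List.count_pos_iff.mpr h

-- ===== VERDICT (by name: the statement is the Claim_ definition above) =====
theorem solve_spec : Claim_equal_solve := by
  intro nums _
  unfold Spec_solve solve solve_alt
  exact loop_eq nums nums
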